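-- pv_equiv track=rewrite | github.com/denoflore/ZFD | scripts/croatian_translator.py | expand_stem
-- ===== SOURCE A (Python) =====
-- ABBREVIATION_MARKS = {
--     'k': ['st', 'sk'],  # Primary, alternate
--     't': ['tr', 'tv'],
--     'f': ['pr', 'fr'],
--     'p': ['pl', 'sp'],
-- }
--
-- STEMS = {
--     'o': 'o',
--     'e': 'e',
--     'i': 'i',
--     'a': 'a',
-- }
--
-- def expand_stem(stem):
--     """
--     Expand stem, converting abbreviation marks to clusters.
--     Returns list of possible expansions.
--     """
--     if not stem:
--         return ['']
--
--     results = ['']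
--     i = 0
--
--     while i < len(stem):
--         char = stem[i]
--
--         # Check for digraphs
--         if i + 1 < len(stem):
--             digraph = stem[i:i+2]
--             if digraph == 'ee':
--                 results = [r + 'e' for r in results]
--                 i += 2
--                 continue
--             elif digraph == 'ii':
--                 results = [r + 'i' for r in results]
--                 i += 2
--                 continue
--
--         # Abbreviation marks - expand to clusters
--         if char in ABBREVIATION_MARKS:
--             clusters = ABBREVIATION_MARKS[char]
--             new_results = []
--             for r in results:
--                 for cluster in clusters:
--                     new_results.append(r + cluster)
--             results = new_results
--         # Vowels
--         elif char in STEMS: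
--             results = [r + STEMS[char] for r in results]
--         # Other consonants
--         elif char == 'd':
--             results = [r + 'd' for r in results]
--         elif char == 'h':
--             pass  # Skip standalone h (part of ch/sh)
--         elif char == 's':
--             results = [r + 's' for r in results]
--         elif char == 'c':
--             results = [r + 'c' for r in results]
--         else:
--             # Unknown - keep as is
--             results = [r + char for r in results]
--
--         i += 1
--
--     return results
-- ===== SOURCE B (Python) =====
-- # B: split the task into a single scan producing per-position choice lists,
-- # then one cartesian product (itertools.product) -- simpler decomposition.
-- import itertools
--
-- CHOICES = {
--     'k': ['st', 'sk'],
--     't': ['tr', 'tv'],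
--     'f': ['pr', 'fr'],
--     'p': ['pl', 'sp'],
--     'h': [''],
-- }
--
-- def expand_stem(stem):
--     options = []
--     i = 0
--     n = len(stem)
--     while i < n:
--         if stem[i:i+2] in ('ee', 'ii'):
--             options.append([stem[i]])
--             i += 2
--         else:
--             options.append(CHOICES.get(stem[i], [stem[i]]))
--             i += 1
--     return [''.join(combo) for combo in itertools.product(*options)]
-- ===== Notes on version B (the rewrite author's own statement) =====
-- stated objective: simpler
-- what changed: A expands the result list character by character inside the scanning loop; B first scans the stem once to build a list of per-position choice lists (digraphs collapse, marks give clusters, 'h' gives ['']), then produces all expansions with one itertools.product.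
import Mathlib
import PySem

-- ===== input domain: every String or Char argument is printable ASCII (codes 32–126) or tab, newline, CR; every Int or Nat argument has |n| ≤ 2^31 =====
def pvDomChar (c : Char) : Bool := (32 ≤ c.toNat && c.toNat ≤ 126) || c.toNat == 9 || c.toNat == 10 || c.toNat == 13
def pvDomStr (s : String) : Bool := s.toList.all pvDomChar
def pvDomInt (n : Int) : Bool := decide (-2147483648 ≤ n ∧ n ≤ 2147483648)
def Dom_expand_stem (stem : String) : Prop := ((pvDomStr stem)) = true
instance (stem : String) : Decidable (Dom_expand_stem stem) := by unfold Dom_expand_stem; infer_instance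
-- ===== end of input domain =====

-- B replaces A's interleaved expand-as-you-scan loop by a scan collecting per-position
-- choice lists followed by one cartesian product (objective: simpler decomposition).


-- ===== PORT A =====
def ABBREVIATION_MARKS : PySem.Dict Char (List String) :=
  PySem.Dict.mk [('k', ["st", "sk"]), ('t', ["tr", "tv"]), ('f', ["pr", "fr"]), ('p', ["pl", "sp"])]

def STEMS : PySem.Dict Char String :=
  PySem.Dict.mk [('o', "o"), ('e', "e"), ('i', "i"), ('a', "a")]

-- the while loop of A, as structural recursion on the remaining characters
def expandStemGo : List Char → List String → List String
  | [], results => results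
  | 'e' :: 'e' :: rest, results => expandStemGo rest (results.map (· ++ "e"))
  | 'i' :: 'i' :: rest, results => expandStemGo rest (results.map (· ++ "i"))
  | c :: rest, results =>
    match PySem.Dict.get? ABBREVIATION_MARKS c with
    | some clusters =>
        expandStemGo rest (results.flatMap (fun r => clusters.map (fun cl => r ++ cl)))
    | none =>
      match PySem.Dict.get? STEMS c with
      | some v => expandStemGo rest (results.map (· ++ v))
      | none =>
        if c = 'd' then expandStemGo rest (results.map (· ++ "d"))
        else if c = 'h' then expandStemGo rest results
        else if c = 's' then expandStemGo rest (results.map (· ++ "s"))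
        else if c = 'c' then expandStemGo rest (results.map (· ++ "c"))
        else expandStemGo rest (results.map (· ++ c.toString))

def expand_stem (stem : String) : List String :=
  if stem = "" then [""] else expandStemGo stem.toList [""]

-- ===== PORT B =====
def CHOICES : PySem.Dict Char (List String) :=
  PySem.Dict.mk [('k', ["st", "sk"]), ('t', ["tr", "tv"]), ('f', ["pr", "fr"]), ('p', ["pl", "sp"]), ('h', [""])]

-- scan: per-position choice lists
def stemOptions : List Char → List (List String)
  | [] => []
  | 'e' :: 'e' :: rest => ["e"] :: stemOptions rest
  | 'i' :: 'i' :: rest => ["i"] :: stemOptions rest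
  | c :: rest => (PySem.Dict.getD CHOICES c [c.toString]) :: stemOptions rest

-- itertools.product (rightmost factor varies fastest) with ''.join fused in
def joinProduct (options : List (List String)) : List String :=
  options.foldl (fun acc opts => acc.flatMap (fun r => opts.map (fun o => r ++ o))) [""]

def expand_stem_alt (stem : String) : List String :=
  joinProduct (stemOptions stem.toList)

-- ===== PRECONDITION & SPEC =====
def Spec_expand_stem (stem : String) (out : List String) : Prop := out = expand_stem_alt stem
instance (stem : String) (out : List String) : Decidable (Spec_expand_stem stem out) := by unfold Spec_expand_stem; infer_instance

-- ===== CLAIM (what is proved, stated in full; the proofs are below) =====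
def Claim_equal_expand_stem : Prop := ∀ (stem : String), Dom_expand_stem stem → Spec_expand_stem stem (expand_stem stem)

-- ===== LEMMAS AND PROOFS =====

lemma acc_singleton (x : String) (res : List String) :
    res.flatMap (fun r => [x].map (fun o => r ++ o)) = res.map (fun r => r ++ x) := by
  simp [← List.map_eq_flatMap]

lemma acc_h (res : List String) :
    res.flatMap (fun r => [""].map (fun o => r ++ o)) = res := by
  simp

lemma stemOptions_cons (c : Char) (rest : List Char)
    (h1 : ∀ r', c = 'e' → rest = 'e' :: r' → False)
    (h2 : ∀ r', c = 'i' → rest = 'i' :: r' → False) :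
    stemOptions (c :: rest) = PySem.Dict.getD CHOICES c [c.toString] :: stemOptions rest := by
  rw [stemOptions.eq_def]
  split
  · simp_all
  · rename_i heq; injection heq with he hr; exact (h1 _ he hr).elim
  · rename_i heq; injection heq with he hr; exact (h2 _ he hr).elim
  · rename_i heq; injection heq with he hr; subst he; subst hr; rfl

lemma choices_abbrev (c : Char) (clusters : List String)
    (hget : ABBREVIATION_MARKS.get? c = some clusters) :
    PySem.Dict.getD CHOICES c [c.toString] = clusters := by
  simp only [ABBREVIATION_MARKS, PySem.Dict.get?_mk_cons] at hget
  split_ifs at hget with h1 h2 h3 h4 <;>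
    [skip; skip; skip; skip; (simp [PySem.Dict.get?] at hget)] <;>
  · cases hget
    first
      | (obtain rfl := beq_iff_eq.mp h1)
      | (obtain rfl := beq_iff_eq.mp h2)
      | (obtain rfl := beq_iff_eq.mp h3)
      | (obtain rfl := beq_iff_eq.mp h4)
    decide

lemma choices_stem (c : Char) (v : String) (hv : STEMS.get? c = some v) :
    PySem.Dict.getD CHOICES c [c.toString] = [v] := by
  simp only [STEMS, PySem.Dict.get?_mk_cons] at hv
  split_ifs at hv with h1 h2 h3 h4 <;>
    [skip; skip; skip; skip; (simp [PySem.Dict.get?] at hv)] <;>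
  · cases hv
    first
      | (obtain rfl := beq_iff_eq.mp h1)
      | (obtain rfl := beq_iff_eq.mp h2)
      | (obtain rfl := beq_iff_eq.mp h3)
      | (obtain rfl := beq_iff_eq.mp h4)
    decide

lemma choices_other (c : Char) (hget : ABBREVIATION_MARKS.get? c = none) (hh : ¬ c = 'h') :
    PySem.Dict.getD CHOICES c [c.toString] = [c.toString] := by
  simp only [ABBREVIATION_MARKS, CHOICES, PySem.Dict.getD, PySem.Dict.get?_mk_cons] at hget ⊢
  split_ifs at hget ⊢ <;> simp_all [PySem.Dict.get?, beq_iff_eq]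
  exact hh (Eq.symm (by assumption))

theorem expandStemGo_eq (cs : List Char) (res : List String) :
    expandStemGo cs res =
      (stemOptions cs).foldl (fun acc opts => acc.flatMap (fun r => opts.map (fun o => r ++ o))) res := by
  fun_induction expandStemGo cs res with
  | case1 res => simp [stemOptions]
  | case2 rest res ih =>
      simp only [stemOptions, List.foldl_cons, acc_singleton]
      exact ih
  | case3 rest res ih =>
      simp only [stemOptions, List.foldl_cons, acc_singleton]
      exact ih
  | case4 c rest res h1 h2 clusters hget ih =>
      rw [stemOptions_cons c rest h1 h2, List.foldl_cons, choices_abbrev c clusters hget]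
      exact ih
  | case5 c rest res h1 h2 hget v hv ih =>
      rw [stemOptions_cons c rest h1 h2, List.foldl_cons, choices_stem c v hv, acc_singleton]
      exact ih
  | case6 rest res h1 h2 hget hstems ih =>
      rw [stemOptions_cons _ rest h1 h2, List.foldl_cons,
        show PySem.Dict.getD CHOICES 'd' ['d'.toString] = ["d"] by decide, acc_singleton]
      exact ih
  | case7 rest res h1 h2 hget hstems hd ih =>
      rw [stemOptions_cons _ rest h1 h2, List.foldl_cons,
        show PySem.Dict.getD CHOICES 'h' ['h'.toString] = [""] by decide, acc_h]
      exact ih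
  | case8 rest res h1 h2 hget hstems hd hh ih =>
      rw [stemOptions_cons _ rest h1 h2, List.foldl_cons,
        show PySem.Dict.getD CHOICES 's' ['s'.toString] = ["s"] by decide, acc_singleton]
      exact ih
  | case9 rest res h1 h2 hget hstems hd hh hs ih =>
      rw [stemOptions_cons _ rest h1 h2, List.foldl_cons,
        show PySem.Dict.getD CHOICES 'c' ['c'.toString] = ["c"] by decide, acc_singleton]
      exact ih
  | case10 c rest res h1 h2 hget hstems hd hh hs hc ih =>
      rw [stemOptions_cons c rest h1 h2, List.foldl_cons, choices_other c hget hh, acc_singleton]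
      exact ih

-- ===== VERDICT (by name: the statement is the Claim_ definition above) =====
theorem expand_stem_spec : Claim_equal_expand_stem := by
  intro stem _
  unfold Spec_expand_stem expand_stem expand_stem_alt joinProduct
  split
  · subst_vars; decide
  · exact expandStemGo_eq _ _
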